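-- pv_equiv track=rewrite | github.com/openxjarvis/clawdbot-python | openclaw/cron/isolated_agent/helpers.py | pick_last_non_empty_text_from_payloads
-- ===== SOURCE A (Python) =====
-- from typing import Any
--
-- def pick_last_non_empty_text_from_payloads(
--     payloads: list[dict[str, Any]],
-- ) -> str | None:
--     """Return the last non-empty text from a list of payloads.
--
--     Mirrors TS pickLastNonEmptyTextFromPayloads.
--     """
--     for payload in reversed(payloads):
--         clean = (payload.get("text") or "").strip()
--         if clean:
--             return clean
--     return None
-- ===== SOURCE B (Python) =====
-- def pick_last_non_empty_text_from_payloads(payloads):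
--     result = None
--     for payload in payloads:
--         clean = (payload.get("text") or "").strip()
--         if clean:
--             result = clean
--     return result
-- ===== Notes on version B (the rewrite author's own statement) =====
-- stated objective: simpler
-- what changed: Replaced the reversed() scan with early return by a single forward pass that keeps the last non-empty stripped text in an accumulator and returns it after the loop.
import Mathlib
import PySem

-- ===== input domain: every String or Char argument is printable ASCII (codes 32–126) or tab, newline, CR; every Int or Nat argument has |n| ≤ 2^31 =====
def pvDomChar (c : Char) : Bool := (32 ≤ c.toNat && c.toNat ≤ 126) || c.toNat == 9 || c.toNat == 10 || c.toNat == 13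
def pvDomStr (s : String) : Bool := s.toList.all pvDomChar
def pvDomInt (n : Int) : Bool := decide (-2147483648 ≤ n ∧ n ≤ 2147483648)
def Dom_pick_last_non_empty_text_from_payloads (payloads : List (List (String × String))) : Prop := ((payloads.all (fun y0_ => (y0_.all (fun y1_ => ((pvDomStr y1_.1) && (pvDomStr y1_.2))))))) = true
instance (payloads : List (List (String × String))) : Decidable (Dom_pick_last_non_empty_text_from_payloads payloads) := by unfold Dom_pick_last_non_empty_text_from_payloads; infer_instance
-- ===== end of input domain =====

-- B replaces A's reversed scan with early return by a forward pass keeping the last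
-- non-empty stripped text in an accumulator (objective: simpler).

-- ===== PORT A =====
-- clean = (payload.get("text") or "").strip()  — values are strings, so `or ""` maps
-- a missing key (None) to "" (an empty string value also yields "" after `or`).
def pvClean (payload : List (String × String)) : String :=
  PySem.Str.strip ((PySem.Dict.mk payload).getD "text" "")

-- the `for payload in reversed(payloads): … return clean` loop, on the reversed list
def pvScanA : List (List (String × String)) → Option String
  | [] => none
  | payload :: rest =>
      let clean := pvClean payload
      if clean ≠ "" then some clean else pvScanA rest

def pick_last_non_empty_text_from_payloads (payloads : List (List (String × String))) : Option String :=
  pvScanA payloads.reverse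

-- ===== PORT B =====
def pick_last_non_empty_text_from_payloads_alt (payloads : List (List (String × String))) : Option String :=
  payloads.foldl (fun result payload =>
    let clean := PySem.Str.strip ((PySem.Dict.mk payload).getD "text" "")
    if clean ≠ "" then some clean else result) none

-- ===== PRECONDITION & SPEC =====
def Spec_pick_last_non_empty_text_from_payloads (payloads : List (List (String × String))) (out : Option String) : Prop := out = pick_last_non_empty_text_from_payloads_alt payloads
instance (payloads : List (List (String × String))) (out : Option String) : Decidable (Spec_pick_last_non_empty_text_from_payloads payloads out) := by unfold Spec_pick_last_non_empty_text_from_payloads; infer_instance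

-- ===== CLAIM (what is proved, stated in full; the proofs are below) =====
def Claim_equal_pick_last_non_empty_text_from_payloads : Prop := ∀ (payloads : List (List (String × String))), Dom_pick_last_non_empty_text_from_payloads payloads → Spec_pick_last_non_empty_text_from_payloads payloads (pick_last_non_empty_text_from_payloads payloads)

-- ===== LEMMAS AND PROOFS =====
theorem pvScanA_append (xs ys : List (List (String × String))) :
    pvScanA (xs ++ ys) = match pvScanA xs with
      | some c => some c
      | none => pvScanA ys := by
  induction xs with
  | nil => simp [pvScanA]
  | cons p t ih =>
      simp only [List.cons_append, pvScanA, ih]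
      by_cases h : pvClean p ≠ "" <;> simp [h]

theorem foldl_eq_scanA (l : List (List (String × String))) (acc : Option String) :
    l.foldl (fun result payload =>
      let clean := PySem.Str.strip ((PySem.Dict.mk payload).getD "text" "")
      if clean ≠ "" then some clean else result) acc
    = match pvScanA l.reverse with
      | some c => some c
      | none => acc := by
  induction l generalizing acc with
  | nil => simp [pvScanA]
  | cons p t ih =>
      simp only [List.foldl_cons, ih, List.reverse_cons, pvScanA_append]
      cases pvScanA t.reverse with
      | some c => rfl
      | none =>
          simp only [pvScanA, pvClean]
          split_ifs <;> rfl

-- ===== VERDICT (by name: the statement is the Claim_ definition above) =====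
theorem pick_last_non_empty_text_from_payloads_spec : Claim_equal_pick_last_non_empty_text_from_payloads := by
  intro payloads _
  unfold Spec_pick_last_non_empty_text_from_payloads pick_last_non_empty_text_from_payloads
      pick_last_non_empty_text_from_payloads_alt
  rw [foldl_eq_scanA]
  cases pvScanA payloads.reverse <;> rfl
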